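-- pv_equiv track=rewrite | github.com/yaeba/binary-search-solutions | solutions/Partition-String.py | solve
-- ===== SOURCE A (Python) =====
-- def solve(s):
--     res = []
--     last_seen = {char: idx for idx, char in enumerate(s)}
--
--     max_seen = 0
--     left = 0
--     for idx, char in enumerate(s):
--         max_seen = max(max_seen, last_seen[char])
--         if max_seen == idx:
--             res.append(idx - left + 1)
--             left = idx + 1
--
--     return res
-- ===== SOURCE B (Python) =====
-- def solve(s):
--     # A position i ends a piece iff no character of s[:i+1] reappears in s[i+1:].
--     cuts = [i for i in range(len(s))
--             if all(c not in s[i + 1:] for c in s[:i + 1])]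
--     res = []
--     prev = -1
--     for i in cuts:
--         res.append(i - prev)
--         prev = i
--     return res
-- ===== Notes on version B (the rewrite author's own statement) =====
-- stated objective: simpler
-- what changed: B drops A's last-occurrence dictionary and running maximum entirely: it directly tests each position i with the defining property of a cut (no character of s[:i+1] reappears in s[i+1:]) and then turns the cut positions into piece lengths by differencing.
import Mathlib
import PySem

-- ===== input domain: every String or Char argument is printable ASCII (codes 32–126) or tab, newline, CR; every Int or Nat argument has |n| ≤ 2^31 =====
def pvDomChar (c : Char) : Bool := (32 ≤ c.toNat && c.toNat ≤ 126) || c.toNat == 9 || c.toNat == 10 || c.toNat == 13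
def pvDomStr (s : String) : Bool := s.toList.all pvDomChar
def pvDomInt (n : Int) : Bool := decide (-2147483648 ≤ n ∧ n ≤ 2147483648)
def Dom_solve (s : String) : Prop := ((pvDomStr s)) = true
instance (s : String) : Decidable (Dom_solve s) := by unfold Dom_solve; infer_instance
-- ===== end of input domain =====

-- B replaces A's last-occurrence dict and running maximum with a direct quadratic test:
-- position i ends a piece iff no character of the prefix s[:i+1] reappears in s[i+1:];
-- objective: simpler/alternative (B is not faster). Equivalence proved for all strings.

-- ===== PORT A =====
def solve (s : String) : List Int :=
  let cs := s.toList
  let last_seen : PySem.Dict Char Int :=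
    (PySem.List.enumerate cs).foldl (fun d p => d.insert p.2 p.1) PySem.Dict.empty
  -- last_seen[char]: the key is always present (char comes from s), so get? is some;
  -- the .getD 0 default is unreachable and only makes the lookup total.
  let st := (PySem.List.enumerate cs).foldl
    (fun (st : List Int × Int × Int) p =>
      let max_seen := max st.2.1 ((last_seen.get? p.2).getD 0)
      if max_seen = p.1 then (st.1 ++ [p.1 - st.2.2 + 1], max_seen, p.1 + 1)
      else (st.1, max_seen, st.2.2))
    ([], 0, 0)
  st.1

-- ===== PORT B =====
def solve_alt (s : String) : List Int :=
  let cs := s.toList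
  let cuts := (PySem.List.pyRange 0 (PySem.List.len cs)).filter
      (fun i => (PySem.List.slice cs none (some (i + 1))).all
        (fun c => !(PySem.List.slice cs (some (i + 1)) none).contains c))
  (cuts.foldl (fun (st : List Int × Int) i => (st.1 ++ [i - st.2], i)) ([], -1)).1

-- ===== PRECONDITION & SPEC =====
def Spec_solve (s : String) (out : List Int) : Prop := out = solve_alt s
instance (s : String) (out : List Int) : Decidable (Spec_solve s out) := by unfold Spec_solve; infer_instance

-- ===== CLAIM (what is proved, stated in full; the proofs are below) =====
def Claim_equal_solve : Prop := ∀ (s : String), Dom_solve s → Spec_solve s (solve s)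

-- ===== LEMMAS AND PROOFS =====

/-- The dict A builds: each character mapped to its last index. -/
def mkLast (cs : List Char) : PySem.Dict Char Int :=
  (PySem.List.enumerate cs).foldl (fun d p => d.insert p.2 p.1) PySem.Dict.empty

/-- A's dict lookup for the character at position `j` (0 outside range; never used there). -/
def lastAt (cs : List Char) (j : Nat) : Int :=
  match cs[j]? with
  | some c => ((mkLast cs).get? c).getD 0
  | none => 0

/-- Running maximum of `lastAt` over the first `k` positions, starting from 0 (A's `max_seen`). -/
def maxSeen (cs : List Char) (k : Nat) : Int :=
  (List.range k).foldl (fun a j => max a (lastAt cs j)) 0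

/-- B's cut test at position `i`. -/
def cutb (cs : List Char) (i : Nat) : Bool :=
  (cs.take (i + 1)).all (fun c => !(cs.drop (i + 1)).contains c)

lemma mkLast_append (cs : List Char) (a : Char) :
    mkLast (cs ++ [a]) = (mkLast cs).insert a (cs.length : Int) := by
  unfold mkLast
  rw [PySem.List.enumerate_append, List.foldl_append]
  simp [PySem.List.enumerate]

lemma mkLast_get (cs : List Char) (c : Char) (hc : c ∈ cs) :
    ∃ m : Nat, (mkLast cs).get? c = some (m : Int) ∧ cs[m]? = some c ∧
      ∀ t, m < t → cs[t]? ≠ some c := by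
  induction cs using List.reverseRecOn with
  | nil => simp at hc
  | append_singleton cs a ih =>
    rw [mkLast_append]
    by_cases hca : c = a
    · subst hca
      refine ⟨cs.length, ?_, ?_, ?_⟩
      · simp [PySem.Dict.get?_insert_self]
      · simp
      · intro t ht
        rw [List.getElem?_eq_none (by simp; omega)]
        simp
    · have hc' : c ∈ cs := by
        rcases List.mem_append.1 hc with h | h
        · exact h
        · simp at h; exact absurd h hca
      obtain ⟨m, hget, hidx, hafter⟩ := ih hc'
      have hm : m < cs.length := by
        by_contra h
        rw [List.getElem?_eq_none (by omega)] at hidx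
        simp at hidx
      refine ⟨m, ?_, ?_, ?_⟩
      · rw [PySem.Dict.get?_insert_of_ne _ _ hca]; exact hget
      · rw [List.getElem?_append_left hm]; exact hidx
      · intro t ht
        by_cases htlen : t < cs.length
        · rw [List.getElem?_append_left htlen]; exact hafter t ht
        · by_cases hteq : t = cs.length
          · subst hteq
            rw [List.getElem?_append_right (le_refl _)]
            simp
            intro h; exact hca h.symm
          · rw [List.getElem?_eq_none (by simp; omega)]
            simp

lemma lastAt_spec (cs : List Char) (j : Nat) (hj : j < cs.length) :
    ∃ m : Nat, lastAt cs j = (m : Int) ∧ j ≤ m ∧ m < cs.length ∧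
      cs[m]? = cs[j]? ∧ ∀ t, m < t → cs[t]? ≠ cs[j]? := by
  have hjg : cs[j]? = some cs[j] := List.getElem?_eq_getElem hj
  have hmem : cs[j] ∈ cs := List.getElem_mem hj
  obtain ⟨m, hget, hidx, hafter⟩ := mkLast_get cs cs[j] hmem
  have hm : m < cs.length := by
    by_contra h
    rw [List.getElem?_eq_none (by omega)] at hidx
    simp at hidx
  have hjm : j ≤ m := by
    by_contra h
    exact hafter j (by omega) hjg
  refine ⟨m, ?_, hjm, hm, by rw [hjg]; exact hidx, by rw [hjg]; exact hafter⟩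
  unfold lastAt
  rw [hjg]
  simp [hget]

lemma foldl_max_le_iff (cs : List Char) (l : List Nat) (a b : Int) :
    l.foldl (fun a j => max a (lastAt cs j)) a ≤ b ↔ a ≤ b ∧ ∀ j ∈ l, lastAt cs j ≤ b := by
  induction l generalizing a with
  | nil => simp
  | cons x xs ih =>
    simp only [List.foldl_cons, ih, List.mem_cons]
    constructor
    · rintro ⟨h1, h2⟩
      rw [max_le_iff] at h1
      exact ⟨h1.1, fun j hj => hj.elim (fun e => e ▸ h1.2) (h2 j)⟩
    · rintro ⟨h1, h2⟩
      exact ⟨max_le h1 (h2 x (Or.inl rfl)), fun j hj => h2 j (Or.inr hj)⟩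

lemma le_foldl_max_mem (cs : List Char) (l : List Nat) (a : Int) (j : Nat) (hj : j ∈ l) :
    lastAt cs j ≤ l.foldl (fun a j => max a (lastAt cs j)) a := by
  by_contra h
  rw [not_le] at h
  have := (foldl_max_le_iff cs l a (l.foldl (fun a j => max a (lastAt cs j)) a)).1 le_rfl
  exact absurd (this.2 j hj) (not_le.2 h)

lemma maxSeen_succ (cs : List Char) (k : Nat) :
    maxSeen cs (k + 1) = max (maxSeen cs k) (lastAt cs k) := by
  unfold maxSeen
  rw [List.range_succ, List.foldl_append]
  rfl

lemma cond_iff (cs : List Char) (k : Nat) (hk : k < cs.length) :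
    maxSeen cs (k + 1) = (k : Int) ↔ cutb cs k = true := by
  have hlow : (k : Int) ≤ maxSeen cs (k + 1) := by
    obtain ⟨m, hm, hjm, _, _, _⟩ := lastAt_spec cs k hk
    calc (k : Int) ≤ (m : Int) := by exact_mod_cast hjm
      _ = lastAt cs k := hm.symm
      _ ≤ _ := le_foldl_max_mem cs (List.range (k + 1)) 0 k (by simp)
  have hcut : cutb cs k = true ↔ ∀ c ∈ cs.take (k + 1), c ∉ cs.drop (k + 1) := by
    unfold cutb
    simp [List.all_eq_true]
  constructor
  · intro hM
    rw [hcut]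
    intro c hcTake hcDrop
    obtain ⟨j, hjlt, hje⟩ := List.mem_take_iff_getElem.1 hcTake
    obtain ⟨t, htlt, hte⟩ := List.mem_drop_iff_getElem.1 hcDrop
    have hjn : j < cs.length := by omega
    have hjk : j < k + 1 := by omega
    obtain ⟨m, hm, hjm, hmn, hmg, hafter⟩ := lastAt_spec cs j hjn
    have hmle : lastAt cs j ≤ (k : Int) := by
      have := le_foldl_max_mem cs (List.range (k + 1)) 0 j (by simp; omega)
      unfold maxSeen at hM
      omega
    have hmk : m ≤ k := by rw [hm] at hmle; exact_mod_cast hmle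
    refine hafter (k + 1 + t) (by omega) ?_
    rw [List.getElem?_eq_getElem (by omega), List.getElem?_eq_getElem hjn, hte, hje]
  · intro hcut'
    rw [hcut] at hcut'
    have hup : maxSeen cs (k + 1) ≤ (k : Int) := by
      unfold maxSeen
      rw [foldl_max_le_iff]
      refine ⟨by exact_mod_cast Nat.zero_le k, fun j hj => ?_⟩
      simp at hj
      have hjn : j < cs.length := by omega
      obtain ⟨m, hm, hjm, hmn, hmg, hafter⟩ := lastAt_spec cs j hjn
      have hmg' : cs[m] = cs[j] := by
        rw [List.getElem?_eq_getElem hmn, List.getElem?_eq_getElem hjn] at hmg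
        exact Option.some.inj hmg
      have hcTake : cs[j] ∈ cs.take (k + 1) :=
        List.mem_take_iff_getElem.2 ⟨j, by omega, rfl⟩
      by_contra hgt
      rw [not_le, hm] at hgt
      have hmk : k < m := by exact_mod_cast hgt
      have hcDrop : cs[j] ∈ cs.drop (k + 1) := by
        refine List.mem_drop_iff_getElem.2 ⟨m - (k + 1), by omega, ?_⟩
        have heq : cs[k + 1 + (m - (k + 1))]'(by omega) = cs[m] := by congr 1; omega
        rw [heq]
        exact hmg'
      exact hcut' cs[j] hcTake hcDrop
    omega

lemma mainLoop (cs : List Char) (kk : Nat) : ∀ (k : Nat), k + kk = cs.length →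
    ∀ (res : List Int) (left : Int),
    (((List.range' k kk).foldl
       (fun (st : List Int × Int × Int) i =>
          let ms := max st.2.1 (lastAt cs i)
          if ms = (i : Int) then (st.1 ++ [(i : Int) - st.2.2 + 1], ms, (i : Int) + 1)
          else (st.1, ms, st.2.2))
       (res, maxSeen cs k, left)).1)
    = ((((List.range' k kk).filter (fun i => cutb cs i)).map (fun (i : Nat) => (i : Int))).foldl
       (fun (st : List Int × Int) i => (st.1 ++ [i - st.2], i))
       (res, left - 1)).1 := by
  induction kk with
  | zero => intro k _ res left; simp
  | succ kk ih =>
    intro k hk res left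
    have hkn : k < cs.length := by omega
    have hms : max (maxSeen cs k) (lastAt cs k) = maxSeen cs (k + 1) :=
      (maxSeen_succ cs k).symm
    rw [List.range'_succ, List.foldl_cons]
    by_cases hfire : maxSeen cs (k + 1) = (k : Int)
    · have hcb : cutb cs k = true := (cond_iff cs k hkn).1 hfire
      rw [List.filter_cons_of_pos hcb, List.map_cons, List.foldl_cons]
      simp only [hms]
      rw [if_pos hfire]
      rw [ih (k + 1) (by omega) (res ++ [(k : Int) - left + 1]) ((k : Int) + 1)]
      have e1 : (k : Int) + 1 - 1 = (k : Int) := by ring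
      have e2 : (k : Int) - left + 1 = (k : Int) - (left - 1) := by ring
      rw [e1, e2]
    · have hcb : cutb cs k ≠ true := fun h => hfire ((cond_iff cs k hkn).2 h)
      rw [List.filter_cons_of_neg (by simpa using hcb)]
      simp only [hms]
      rw [if_neg hfire]
      exact ih (k + 1) (by omega) res left

lemma solve_eq_loop (s : String) :
    solve s = ((List.range' 0 s.toList.length).foldl
       (fun (st : List Int × Int × Int) i =>
          let ms := max st.2.1 (lastAt s.toList i)
          if ms = (i : Int) then (st.1 ++ [(i : Int) - st.2.2 + 1], ms, (i : Int) + 1)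
          else (st.1, ms, st.2.2))
       ([], maxSeen s.toList 0, 0)).1 := by
  unfold solve
  set cs := s.toList with hcs
  simp only []
  rw [show ((PySem.List.enumerate cs).foldl
      (fun (d : PySem.Dict Char Int) p => d.insert p.2 p.1) PySem.Dict.empty) = mkLast cs
      from rfl]
  rw [PySem.List.enumerate_eq_map_pyRange cs 'a']
  have hlen : PySem.List.len cs = ((cs.length : Nat) : Int) := rfl
  rw [hlen, PySem.List.pyRange_zero_natCast, List.map_map, List.foldl_map]
  rw [← List.range_eq_range', show maxSeen cs 0 = 0 from rfl]
  congr 1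
  apply PySem.List.foldl_congr_mem
  intro acc j hj
  have hjn : j < cs.length := List.mem_range.1 hj
  have hget : PySem.List.pyGetD cs ((j : Nat) : Int) 'a' = cs[j] := by
    rw [PySem.List.pyGetD_eq_getElem cs 'a' (by exact_mod_cast Nat.zero_le j)
      (by exact_mod_cast hjn)]
    simp
  have hlast : ((mkLast cs).get? cs[j]).getD 0 = lastAt cs j := by
    unfold lastAt
    rw [List.getElem?_eq_getElem hjn]
  simp only [Function.comp, hget]
  rw [hlast]

lemma solve_alt_eq_loop (s : String) :
    solve_alt s = ((((List.range' 0 s.toList.length).filter (fun i => cutb s.toList i)).map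
       (fun (i : Nat) => (i : Int))).foldl
       (fun (st : List Int × Int) i => (st.1 ++ [i - st.2], i))
       ([], (0 : Int) - 1)).1 := by
  unfold solve_alt
  set cs := s.toList with hcs
  simp only []
  have hlen : PySem.List.len cs = ((cs.length : Nat) : Int) := rfl
  rw [hlen, PySem.List.pyRange_zero_natCast, List.filter_map]
  rw [← List.range_eq_range']
  congr 1
  rw [show (0 : Int) - 1 = -1 by norm_num]
  refine congrArg (List.foldl _ ([], -1)) ?_
  refine congrArg (List.map (fun (k : Nat) => (k : Int))) ?_
  · apply List.filter_congr
    intro j hj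
    simp only [Function.comp]
    have h1 : PySem.List.slice cs none (some ((j : Int) + 1)) = cs.take (j + 1) := by
      rw [PySem.List.slice_to cs (by positivity)]
      congr 1
    have h2 : PySem.List.slice cs (some ((j : Int) + 1)) none = cs.drop (j + 1) := by
      rw [PySem.List.slice_from cs (by positivity)]
      congr 1
    rw [h1, h2]
    rfl

-- ===== VERDICT (by name: the statement is the Claim_ definition above) =====
theorem solve_spec : Claim_equal_solve := by
  intro s _
  unfold Spec_solve
  rw [solve_eq_loop, solve_alt_eq_loop]
  exact mainLoop s.toList s.toList.length 0 (by omega) [] 0
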